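-- pv_equiv track=rewrite | github.com/plavakd10/LeetCode-Daily | LEETCODE_3501_to_4000/3769.Sort Integers by Binary Reflection.py | sortByReflection
-- ===== SOURCE A (Python) =====
-- def sortByReflection(nums):
--     def reflect(x: int) -> int:
--         rev = 0
--         while x > 0:
--             rev = (rev << 1) | (x & 1)
--             x >>= 1
--         return rev
--     nums.sort(key=lambda x: (reflect(x), x))
--     return nums
-- ===== SOURCE B (Python) =====
-- def sortByReflection(nums):
--     def reflect(x):
--         if x <= 0:
--             return 0
--         return ((x & 1) << (x.bit_length() - 1)) | reflect(x >> 1)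
--     nums[:] = [x for _, x in sorted((reflect(x), x) for x in nums)]
--     return nums
-- ===== Notes on version B (the rewrite author's own statement) =====
-- stated objective: alternative
-- what changed: reflect is rewritten from an accumulate-and-shift while loop into a structural recursion that places each low bit directly at its mirrored position via bit_length, and the in-place key sort is replaced by a decorate-sort-undecorate over (reflect(x), x) pairs.
import Mathlib
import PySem

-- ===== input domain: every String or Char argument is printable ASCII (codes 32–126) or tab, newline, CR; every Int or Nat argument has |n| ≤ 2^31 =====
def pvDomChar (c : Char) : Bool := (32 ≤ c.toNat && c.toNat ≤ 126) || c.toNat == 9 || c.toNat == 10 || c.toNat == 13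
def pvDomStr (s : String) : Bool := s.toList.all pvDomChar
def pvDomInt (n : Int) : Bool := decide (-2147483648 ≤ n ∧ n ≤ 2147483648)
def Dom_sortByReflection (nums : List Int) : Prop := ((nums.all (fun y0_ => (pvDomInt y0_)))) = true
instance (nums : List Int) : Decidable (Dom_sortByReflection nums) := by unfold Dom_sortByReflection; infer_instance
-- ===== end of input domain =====

-- B replaces the accumulate-and-shift reflect loop by a structural recursion placing each bit
-- at its mirrored position, and sorts decorated (reflect(x), x) pairs instead of an in-place key
-- sort (alternative decomposition, same cost). Both Pythons mutate `nums` in place and return it;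
-- the equivalence proved here is about the return value (B performs the same mutation via nums[:]=).

-- termination helper for both ports (cited by name in decreasing_by)
theorem pvShiftHalf_lt (x : Int) (h : 0 < x) : (x >>> (1:Nat)).toNat < x.toNat := by
  cases x with
  | ofNat n =>
    have h1 : ((Int.ofNat n) >>> (1:Nat)) = Int.ofNat (n >>> 1) := rfl
    have h2 : (0:Int) < (n:Int) := h
    have hn : 0 < n := by exact_mod_cast h2
    rw [h1]
    show n >>> 1 < n
    rw [Nat.shiftRight_one]
    omega
  | negSucc n => simp at h

-- ===== PORT A =====
-- rev = (rev << 1) | (x & 1); x >>= 1  — Python <<,>> are Lean's <<<,>>>; &,| are PySem band/bor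
def pvReflectA (x : Int) (rev : Int) : Int :=
  if h : 0 < x then
    pvReflectA (x >>> (1:Nat)) (PySem.Int.bor (rev <<< (1:Nat)) (PySem.Int.band x 1))
  else rev
termination_by x.toNat
decreasing_by exact pvShiftHalf_lt x h

def sortByReflection (nums : List Int) : List Int :=
  PySem.List.sorted2 nums (fun x => pvReflectA x 0) (fun x => x) false

-- ===== PORT B =====
-- x.bit_length() for x ≥ 0, ported by hand (exact): number of binary digits of x
def pvBitLength (n : Nat) : Nat :=
  if n = 0 then 0 else pvBitLength (n / 2) + 1

-- ((x & 1) << (x.bit_length() - 1)) | reflect(x >> 1)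
def pvReflectB (x : Int) : Int :=
  if h : x ≤ 0 then 0
  else
    PySem.Int.bor ((PySem.Int.band x 1) <<< (pvBitLength x.toNat - 1)) (pvReflectB (x >>> (1:Nat)))
termination_by x.toNat
decreasing_by exact pvShiftHalf_lt x (by omega)

-- Python's `<` on int pairs (lexicographic), ported by hand (exact: Int is a total order,
-- so not (b.1 < a.1) means a.1 ≤ b.1, i.e. first components equal when neither is smaller)
def pvTupleLt (a b : Int × Int) : Bool :=
  decide (a.1 < b.1) || (!decide (b.1 < a.1) && decide (a.2 < b.2))

-- sorted((reflect(x), x) for x in nums) then strip the decoration; sorted = stable insertion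
-- sort (PySem.List.insertBy), the pair comparison is pvTupleLt
def sortByReflection_alt (nums : List Int) : List Int :=
  ((nums.map (fun x => (pvReflectB x, x))).foldl
      (fun acc p => PySem.List.insertBy pvTupleLt p acc) []).map (fun p => p.2)

-- ===== PRECONDITION & SPEC =====
def Spec_sortByReflection (nums : List Int) (out : List Int) : Prop := out = sortByReflection_alt nums
instance (nums : List Int) (out : List Int) : Decidable (Spec_sortByReflection nums out) := by unfold Spec_sortByReflection; infer_instance

-- ===== CLAIM (what is proved, stated in full; the proofs are below) =====
def Claim_equal_sortByReflection : Prop := ∀ (nums : List Int), Dom_sortByReflection nums → Spec_sortByReflection nums (sortByReflection nums)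

-- ===== LEMMAS AND PROOFS =====

theorem pow_lor (k m : Nat) (h : m < 2^k) : 2^k ||| m = 2^k + m := by
  induction k generalizing m with
  | zero => interval_cases m; decide
  | succ k ih =>
    cases hb0 : m.testBit 0 with
    | false =>
      have hm0 : m % 2 = 0 := by simpa [Nat.testBit_zero] using hb0
      have hb := Nat.lor_bit false (2^k) false (m/2)
      simp only [Nat.bit_val, Bool.toNat_false, Bool.false_or] at hb
      have e1 : 2 * 2^k + 0 = 2^(k+1) := by ring
      have e2 : 2 * (m/2) + 0 = m := by omega
      rw [e1, e2] at hb
      rw [hb, ih (m/2) (by omega)]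
      have := pow_succ 2 k
      omega
    | true =>
      have hm0 : m % 2 = 1 := by simpa [Nat.testBit_zero] using hb0
      have hb := Nat.lor_bit false (2^k) true (m/2)
      simp only [Nat.bit_val, Bool.toNat_false, Bool.toNat_true, Bool.false_or] at hb
      have e1 : 2 * 2^k + 0 = 2^(k+1) := by ring
      rw [e1] at hb
      have e2 : 2 * (m/2) + 1 = m := by omega
      rw [e2] at hb
      rw [hb, ih (m/2) (by omega)]
      have := pow_succ 2 k
      omega

theorem two_mul_lor_bit (r b : Nat) (hb : b ≤ 1) : 2*r ||| b = 2*r + b := by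
  interval_cases b
  · simp
  · have h := Nat.lor_bit false r true 0
    simpa [Nat.bit_val] using h

-- proof-only Nat mirror of pvReflectB
def natB (n : Nat) : Nat :=
  if n = 0 then 0 else ((n % 2) <<< (pvBitLength n - 1)) ||| natB (n / 2)

theorem natB_lt (n : Nat) : natB n < 2 ^ pvBitLength n := by
  induction n using Nat.strong_induction_on with
  | _ n ih =>
    by_cases h : n = 0
    · subst h; simp [natB, pvBitLength]
    · rw [natB, pvBitLength]
      simp only [h, if_false]
      have ih2 := ih (n/2) (Nat.div_lt_self (by omega) (by omega))
      have hsh : (n % 2) <<< (pvBitLength (n/2) + 1 - 1) = (n % 2) * 2 ^ pvBitLength (n/2) := by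
        rw [Nat.shiftLeft_eq, Nat.add_sub_cancel]
      rw [hsh]
      have hp := pow_succ 2 (pvBitLength (n/2))
      rcases Nat.mod_two_eq_zero_or_one n with h2 | h2
      · rw [h2, Nat.zero_mul, Nat.zero_or]
        omega
      · rw [h2, Nat.one_mul, pow_lor _ _ ih2]
        omega

theorem natB_eq (n : Nat) (h : n ≠ 0) :
    natB n = (n % 2) * 2 ^ (pvBitLength n - 1) + natB (n / 2) := by
  rw [natB]
  simp only [h, if_false]
  have hbl : pvBitLength n = pvBitLength (n/2) + 1 := by rw [pvBitLength]; simp [h]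
  have hsh : (n % 2) <<< (pvBitLength n - 1) = (n % 2) * 2 ^ (pvBitLength n - 1) := by
    rw [Nat.shiftLeft_eq]
  rw [hsh]
  have hlt : natB (n/2) < 2 ^ (pvBitLength n - 1) := by
    have := natB_lt (n/2); rw [hbl]; simpa using this
  rcases Nat.mod_two_eq_zero_or_one n with h2 | h2
  · rw [h2]; simp
  · rw [h2]
    simpa using pow_lor _ _ hlt

theorem natCast_shiftRight (n : Nat) : ((n : Int) >>> (1:Nat)) = ((n >>> 1 : Nat) : Int) := rfl

theorem reflB_cast (n : Nat) : pvReflectB (n : Int) = (natB n : Int) := by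
  induction n using Nat.strong_induction_on with
  | _ n ih =>
    by_cases h : n = 0
    · subst h; rw [pvReflectB, natB]; simp
    · rw [pvReflectB, natB]
      have hn0 : ¬ ((n : Int) ≤ 0) := by
        simp only [not_le]; exact_mod_cast Nat.pos_of_ne_zero h
      simp only [hn0, dif_neg, not_false_iff, h, if_false]
      rw [natCast_shiftRight, ih (n >>> 1) (by rw [Nat.shiftRight_one]; exact Nat.div_lt_self (by omega) (by omega))]
      have hb : PySem.Int.band (n : Int) 1 = ((n &&& 1 : Nat) : Int) := by
        exact_mod_cast PySem.Int.band_natCast n 1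
      rw [hb]
      have hsh : (((n &&& 1 : Nat) : Int) <<< (pvBitLength (Int.toNat (n:Int)) - 1)) =
          (((n &&& 1) <<< (pvBitLength n - 1) : Nat) : Int) := by
        simp [Int.toNat_natCast]
      rw [hsh]
      have hor := PySem.Int.bor_natCast ((n &&& 1) <<< (pvBitLength n - 1)) (natB (n >>> 1))
      rw [hor]
      rw [Nat.shiftRight_one, Nat.and_one_is_mod]

theorem reflA_cast (n r : Nat) : pvReflectA (n : Int) (r : Int) = ((r * 2 ^ pvBitLength n + natB n : Nat) : Int) := by
  induction n using Nat.strong_induction_on generalizing r with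
  | _ n ih =>
    by_cases h : n = 0
    · subst h
      rw [pvReflectA, natB, pvBitLength]
      simp
    · rw [pvReflectA]
      have hn0 : (0:Int) < (n:Int) := by exact_mod_cast Nat.pos_of_ne_zero h
      simp only [hn0, dif_pos]
      have hshl : ((r : Int) <<< (1:Nat)) = ((r <<< 1 : Nat) : Int) := rfl
      have hb : PySem.Int.band (n : Int) 1 = ((n &&& 1 : Nat) : Int) := by
        exact_mod_cast PySem.Int.band_natCast n 1
      rw [hshl, hb, PySem.Int.bor_natCast, natCast_shiftRight]
      rw [ih (n >>> 1) (by rw [Nat.shiftRight_one]; exact Nat.div_lt_self (by omega) (by omega))]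
      congr 1
      rw [Nat.shiftRight_one, Nat.and_one_is_mod, Nat.shiftLeft_eq]
      have e : r * 2^1 = 2*r := by ring
      rw [e, two_mul_lor_bit r (n % 2) (by omega)]
      rw [natB_eq n h]
      have hbl : pvBitLength n = pvBitLength (n/2) + 1 := by rw [pvBitLength]; simp [h]
      rw [hbl]
      have hp := pow_succ 2 (pvBitLength (n/2))
      rcases Nat.mod_two_eq_zero_or_one n with h2 | h2
      · rw [h2]; ring_nf
      · rw [h2]
        ring_nf
        have e2 : 1 + pvBitLength (n / 2) - 1 = pvBitLength (n / 2) := by omega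
        rw [e2]

theorem reflect_eq (x : Int) : pvReflectA x 0 = pvReflectB x := by
  by_cases h : 0 < x
  · have hx : x = ((x.toNat : Nat) : Int) := by omega
    rw [hx]
    have h0 : (0:Int) = ((0:Nat):Int) := rfl
    rw [h0, reflA_cast, reflB_cast]
    simp
  · rw [pvReflectA, pvReflectB]
    simp only [h, dif_neg, not_false_iff]
    have : x ≤ 0 := by omega
    simp [this]

def pvLtA (a b : Int) : Bool :=
  decide (pvReflectA a 0 < pvReflectA b 0) || (!decide (pvReflectA b 0 < pvReflectA a 0) && decide (a < b))

theorem tupleLt_eq (a b : Int) :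
    pvTupleLt (pvReflectB a, a) (pvReflectB b, b) = pvLtA a b := by
  simp [pvTupleLt, pvLtA, reflect_eq]

theorem insertBy_map (x : Int) (l : List Int) :
    PySem.List.insertBy pvTupleLt (pvReflectB x, x) (l.map (fun y => (pvReflectB y, y))) =
      (PySem.List.insertBy pvLtA x l).map (fun y => (pvReflectB y, y)) := by
  induction l with
  | nil => simp [PySem.List.insertBy]
  | cons y ys ih =>
    simp only [List.map_cons, PySem.List.insertBy, tupleLt_eq]
    cases hxy : pvLtA x y with
    | true => simp
    | false => simp [ih]

theorem foldl_map (xs : List Int) (acc : List Int) :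
    (xs.map (fun y => (pvReflectB y, y))).foldl
        (fun acc p => PySem.List.insertBy pvTupleLt p acc) (acc.map (fun y => (pvReflectB y, y))) =
      (xs.foldl (fun acc x => PySem.List.insertBy pvLtA x acc) acc).map (fun y => (pvReflectB y, y)) := by
  induction xs generalizing acc with
  | nil => simp
  | cons x xs ih =>
    simp only [List.map_cons, List.foldl_cons]
    rw [insertBy_map, ih]

-- ===== VERDICT (by name: the statement is the Claim_ definition above) =====
theorem sortByReflection_spec : Claim_equal_sortByReflection := by
  intro nums _
  unfold Spec_sortByReflection sortByReflection sortByReflection_alt PySem.List.sorted2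
  have hfold := foldl_map nums []
  simp only [List.map_nil] at hfold
  rw [hfold]
  simp only [List.map_map]
  have hid : ((fun p : Int × Int => p.2) ∘ (fun y : Int => (pvReflectB y, y))) = id := rfl
  rw [hid, List.map_id]
  simp only [Bool.false_eq_true, if_false]
  congr 1
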